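-- pv_equiv track=rewrite | github.com/AureliaBerneman/Kidud | intersection_sizes.py | get_radius1_l_ball
-- ===== SOURCE A (Python) =====
-- def get_radius1_l_ball(word: tuple) -> set:
--     """
--     The function receives a binary word in tuple form and returns its radius-1 l-ball as a set
--     :param word: the binary word in tuple form
--     :return: the radius-1 l-ball of the binary word
--     """
--     ball = {word}
--     word_list = list(word)
--     # insert 0 somewhere and delete one bit somewhere else
--     for i in range(len(word_list) + 1):
--         word_list.insert(i, 0)
--         for j in range(len(word_list)):
--             if j == i:
--                 continue
--             tmp = word_list[j]
--             word_list.pop(j)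
--             ball.add(tuple(word_list))
--             word_list.insert(j, tmp)
--         word_list = list(word)
--     word_list = list(word)
--     # insert 1 somewhere and delete one bit somewhere else
--     for i in range(len(word_list) + 1):
--         word_list.insert(i, 1)
--         for j in range(len(word_list)):
--             if j == i:
--                 continue
--             tmp = word_list[j]
--             word_list.pop(j)
--             ball.add(tuple(word_list))
--             word_list.insert(j, tmp)
--         word_list = list(word)
--     return ball
-- ===== SOURCE B (Python) =====
-- def get_radius1_l_ball(word: tuple) -> set:
--     """Radius-1 l-ball: insert one bit, delete one bit elsewhere.
--     Same result as the original, built by O(1) incremental updates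
--     (each next deletion differs from the previous by one position)
--     instead of repeated insert/pop list surgery."""
--     n = len(word)
--     ball = {word}
--     for b in (0, 1):
--         for i in range(n + 1):
--             w = word[:i] + (b,) + word[i:]
--             cur = list(w[1:])          # w with position 0 deleted
--             if i != 0:
--                 ball.add(tuple(cur))
--             for j in range(1, n + 1):
--                 cur[j - 1] = w[j - 1]  # now cur = w with position j deleted
--                 if j != i:
--                     ball.add(tuple(cur))
--     return ball
-- ===== Notes on version B (the rewrite author's own statement) =====
-- stated objective: alternative
-- what changed: A simulates every insert-then-delete by O(n) list surgery (insert, index, pop, re-insert) on a mutable copy; B builds each inserted word once by slicing and then generates the consecutive deletions incrementally, each by a single O(1) in-place cell update, adding the same candidates in the same order.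
import Mathlib
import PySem

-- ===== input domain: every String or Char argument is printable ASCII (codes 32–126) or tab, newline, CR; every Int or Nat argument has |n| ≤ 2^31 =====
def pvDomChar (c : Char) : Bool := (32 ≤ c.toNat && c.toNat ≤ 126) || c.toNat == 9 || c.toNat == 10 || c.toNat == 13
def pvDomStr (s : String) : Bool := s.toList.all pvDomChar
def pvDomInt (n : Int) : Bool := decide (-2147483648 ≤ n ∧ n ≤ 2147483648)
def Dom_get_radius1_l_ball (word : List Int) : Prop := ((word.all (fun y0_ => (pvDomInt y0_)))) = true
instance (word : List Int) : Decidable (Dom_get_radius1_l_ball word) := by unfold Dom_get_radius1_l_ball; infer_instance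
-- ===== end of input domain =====

-- B replaces A's repeated insert/pop list surgery by an incremental scheme: for each
-- inserted bit, consecutive deletions differ in one position, so each candidate is
-- obtained by a single in-place update (objective: alternative; same add order, same set).


-- ===== PORT A =====
-- inner loop body: tmp = wl[j]; wl.pop(j); ball.add(tuple(wl)); wl.insert(j, tmp)
def pvAInner (i : Int) (st : List (List Int) × List Int) (j : Int) :
    List (List Int) × List Int :=
  if j = i then st
  else
    match PySem.List.pyGet? st.2 j, PySem.List.pop? st.2 j with
    | some tmp, some (_, rest) => (PySem.Set.add st.1 rest, PySem.List.insert rest j tmp)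
    | _, _ => st  -- unreachable: j ranges over the indices of st.2

-- one of A's two identical blocks (insert bit b somewhere, delete one bit elsewhere)
def pvABlock (word : List Int) (b : Int) (ball : List (List Int)) : List (List Int) :=
  ((PySem.List.pyRange 0 ((word.length : Int) + 1)).foldl
      (fun (st : List (List Int) × List Int) i =>
        let wl := PySem.List.insert st.2 i b
        let st2 := (PySem.List.pyRange 0 ((wl.length : Int))).foldl (pvAInner i) (st.1, wl)
        (st2.1, word))
      (ball, word)).1

def get_radius1_l_ball (word : List Int) : List (List Int) :=
  pvABlock word 1 (pvABlock word 0 (PySem.Set.add PySem.Set.empty word))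

-- ===== PORT B =====
-- inner loop body: cur[j-1] = w[j-1]; if j != i: ball.add(tuple(cur))
def pvBInner (i : Int) (w : List Int) (st : List (List Int) × List Int) (j : Int) :
    List (List Int) × List Int :=
  let cur := PySem.List.pySetD st.2 (j - 1) (PySem.List.pyGetD w (j - 1) 0)
  (if j ≠ i then PySem.Set.add st.1 cur else st.1, cur)

-- body of B's i-loop: w = word[:i]+(b,)+word[i:]; cur = list(w[1:]); …
def pvBRow (word : List Int) (n : Int) (b : Int) (ball : List (List Int)) (i : Int) :
    List (List Int) :=
  let w := PySem.List.slice word none (some i) ++ b :: PySem.List.slice word (some i) none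
  let cur0 := PySem.List.slice w (some 1) none
  let ball1 := if i ≠ 0 then PySem.Set.add ball cur0 else ball
  ((PySem.List.pyRange 1 (n + 1)).foldl (pvBInner i w) (ball1, cur0)).1

def get_radius1_l_ball_alt (word : List Int) : List (List Int) :=
  let n : Int := word.length
  [(0 : Int), 1].foldl
    (fun ball b => (PySem.List.pyRange 0 (n + 1)).foldl (pvBRow word n b) ball)
    (PySem.Set.add PySem.Set.empty word)

-- ===== PRECONDITION & SPEC =====
def Spec_get_radius1_l_ball (word : List Int) (out : List (List Int)) : Prop := out = get_radius1_l_ball_alt word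
instance (word : List Int) (out : List (List Int)) : Decidable (Spec_get_radius1_l_ball word out) := by unfold Spec_get_radius1_l_ball; infer_instance

-- ===== CLAIM (what is proved, stated in full; the proofs are below) =====
def Claim_equal_get_radius1_l_ball : Prop := ∀ (word : List Int), Dom_get_radius1_l_ball word → Spec_get_radius1_l_ball word (get_radius1_l_ball word)

-- ===== LEMMAS AND PROOFS =====

-- the word with bit b inserted at position i
def pvW (word : List Int) (b : Int) (i : Nat) : List Int :=
  word.take i ++ b :: word.drop i

-- the sequence of candidates both inner loops add, in order
def pvSeq (w : List Int) (i n : Nat) : List (List Int) :=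
  ((List.range (n + 1)).filter (fun j => j ≠ i)).map (fun j => w.eraseIdx j)

lemma pvW_length (word : List Int) (b : Int) (i : Nat) :
    (pvW word b i).length = word.length + 1 := by
  simp [pvW]

lemma pv_insert_erase (w : List Int) (j : Nat) (h : j < w.length) :
    PySem.List.insert (w.eraseIdx j) (j : Int) (w[j]) = w := by
  have ht : (w.take j).length = j := by rw [List.length_take]; omega
  rw [List.eraseIdx_eq_take_drop_succ]
  rw [PySem.List.insert_natCast _ _ _ (by simp [List.length_take, List.length_drop]; omega)]
  rw [List.take_left' ht, List.drop_left' ht]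
  rw [List.getElem_cons_drop h, List.take_append_drop]

lemma pv_set_erase (w : List Int) (k : Nat) (h : k + 1 < w.length) :
    (w.eraseIdx k).set k (w.getD k 0) = w.eraseIdx (k + 1) := by
  have ht : (w.take k).length = k := by rw [List.length_take]; omega
  rw [List.eraseIdx_eq_take_drop_succ, List.eraseIdx_eq_take_drop_succ]
  rw [List.set_append, if_neg (by omega), ht, Nat.sub_self]
  rw [show w.drop (k + 1) = w[k + 1] :: w.drop (k + 2) from (List.getElem_cons_drop h).symm]
  rw [List.set_cons_zero]
  rw [List.getD_eq_getElem w 0 (by omega)]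
  have htk : List.take (k + 1) w = List.take k w ++ [w[k]] := by
    rw [List.take_add_one, List.getElem?_eq_getElem (show k < w.length by omega)]
    rfl
  rw [htk, List.append_assoc, List.singleton_append]

lemma pvSet_update_cons {s : List (List Int)} {x : List Int} {L : List (List Int)} :
    PySem.Set.update s (x :: L) = PySem.Set.update (PySem.Set.add s x) L := rfl

-- A's inner loop: the list state is restored every iteration; only the ball grows.
lemma pvA_inner (w : List Int) (i : Int) :
    ∀ (js : List Nat) (ball : List (List Int)), (∀ j ∈ js, j < w.length) →
      (js.map (fun (j : Nat) => (j : Int))).foldl (pvAInner i) (ball, w) =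
      (PySem.Set.update ball ((js.filter (fun (j : Nat) => (j : Int) ≠ i)).map (fun j => w.eraseIdx j)), w) := by
  intro js
  induction js with
  | nil => intro ball _; simp [PySem.Set.update]
  | cons j js ih =>
    intro ball hb
    have hj : j < w.length := hb j (by simp)
    simp only [List.map_cons, List.foldl_cons, List.filter_cons]
    by_cases hji : (j : Int) = i
    · have hd : (decide ((j : Int) ≠ i)) = false := by simp [hji]
      rw [hd, if_neg (by simp)]
      rw [show pvAInner i (ball, w) (j : Int) = (ball, w) from by
        simp [pvAInner, if_pos hji]]
      exact ih ball (fun x hx => hb x (by simp [hx]))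
    · have hd : (decide ((j : Int) ≠ i)) = true := by simp [hji]
      rw [hd, if_pos rfl]
      rw [show pvAInner i (ball, w) (j : Int) = (PySem.Set.add ball (w.eraseIdx j), w) from by
        simp only [pvAInner, if_neg hji]
        rw [PySem.List.pyGet?_natCast, List.getElem?_eq_getElem hj,
            PySem.List.pop?_natCast _ _ hj]
        simp only []
        rw [pv_insert_erase w j hj]]
      rw [List.map_cons, pvSet_update_cons]
      exact ih _ (fun x hx => hb x (by simp [hx]))

-- B's inner loop: cur is always w minus one position; each step is a single set.
lemma pvB_inner (w : List Int) (i : Int) :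
    ∀ (m j0 : Nat) (ball : List (List Int)), 1 ≤ j0 → j0 + m ≤ w.length →
      ((List.range' j0 m).map (fun (j : Nat) => (j : Int))).foldl (pvBInner i w) (ball, w.eraseIdx (j0 - 1)) =
      (PySem.Set.update ball (((List.range' j0 m).filter (fun (j : Nat) => (j : Int) ≠ i)).map (fun j => w.eraseIdx j)),
       w.eraseIdx (j0 + m - 1)) := by
  intro m
  induction m with
  | zero => intro j0 ball _ _; simp [PySem.Set.update]
  | succ m ih =>
    intro j0 ball h1 h2
    rw [List.range'_succ]
    simp only [List.map_cons, List.foldl_cons, List.filter_cons]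
    have hcast : ((j0 : Int) - 1) = ((j0 - 1 : Nat) : Int) := by omega
    have hup : PySem.List.pySetD (w.eraseIdx (j0 - 1)) ((j0 : Int) - 1)
        (PySem.List.pyGetD w ((j0 : Int) - 1) 0) = w.eraseIdx j0 := by
      rw [hcast, PySem.List.pySetD_natCast, PySem.List.pyGetD_natCast]
      have := pv_set_erase w (j0 - 1) (by omega)
      rwa [Nat.sub_add_cancel h1] at this
    simp only [pvBInner, hup]
    have hrest := ih (j0 + 1) (if (j0 : Int) ≠ i then PySem.Set.add ball (w.eraseIdx j0) else ball)
        (by omega) (by omega)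
    have he1 : j0 + 1 - 1 = j0 := by omega
    have he2 : j0 + 1 + m - 1 = j0 + (m + 1) - 1 := by omega
    rw [he1, he2] at hrest
    by_cases hji : (j0 : Int) ≠ i
    · simp only [if_pos hji] at hrest ⊢
      rw [hrest]
      have hd : (decide ((j0 : Int) ≠ i)) = true := by simp [hji]
      rw [hd, if_pos rfl, List.map_cons, pvSet_update_cons]
    · simp only [if_neg hji] at hrest ⊢
      rw [hrest]
      have hd : (decide ((j0 : Int) ≠ i)) = false := by simpa using hji
      rw [hd, if_neg (by simp)]

-- common value of one full i-iteration, phrased over Nat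
def pvRowSpec (word : List Int) (b : Int) (s : List (List Int)) (iN : Nat) : List (List Int) :=
  PySem.Set.update s (pvSeq (pvW word b iN) iN word.length)

lemma pv_filter_cast (l : List Nat) (iN : Nat) :
    l.filter (fun (j : Nat) => (j : Int) ≠ (iN : Int)) =
    l.filter (fun (j : Nat) => j ≠ iN) := by
  apply List.filter_congr
  intro j _
  simp

lemma pvA_row (word : List Int) (b : Int) (ball : List (List Int)) (iN : Nat)
    (hi : iN ≤ word.length) :
    (PySem.List.pyRange 0 (((PySem.List.insert word (iN : Int) b).length : Int))).foldl
        (pvAInner (iN : Int)) (ball, PySem.List.insert word (iN : Int) b) =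
      (pvRowSpec word b ball iN, pvW word b iN) := by
  rw [PySem.List.insert_natCast _ _ _ hi]
  have hw : word.take iN ++ b :: word.drop iN = pvW word b iN := rfl
  rw [hw]
  have hlen : ((pvW word b iN).length : Int) = ((word.length + 1 : Nat) : Int) := by
    rw [pvW_length word b iN]
  rw [hlen, PySem.List.pyRange_zero_natCast]
  rw [pvA_inner (pvW word b iN) (iN : Int) (List.range (word.length + 1)) ball
      (fun j hj => by rw [pvW_length word b iN]; exact List.mem_range.mp hj)]
  rw [pvRowSpec, pvSeq, pv_filter_cast]

lemma pvABlock_eq (word : List Int) (b : Int) (ball : List (List Int)) :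
    pvABlock word b ball = (List.range (word.length + 1)).foldl (pvRowSpec word b) ball := by
  unfold pvABlock
  have hc : ((word.length : Int) + 1) = ((word.length + 1 : Nat) : Int) := by push_cast; ring
  rw [hc, PySem.List.pyRange_zero_natCast]
  have h : ∀ (js : List Nat) (s : List (List Int)), (∀ i ∈ js, i ≤ word.length) →
      (js.map (fun (k : Nat) => (k : Int))).foldl
        (fun (st : List (List Int) × List Int) i =>
          let wl := PySem.List.insert st.2 i b
          let st2 := (PySem.List.pyRange 0 ((wl.length : Int))).foldl (pvAInner i) (st.1, wl)
          (st2.1, word))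
        (s, word) = (js.foldl (pvRowSpec word b) s, word) := by
    intro js
    induction js with
    | nil => intro s _; simp
    | cons i js ih =>
      intro s hb
      simp only [List.map_cons, List.foldl_cons]
      rw [pvA_row word b s i (hb i (by simp))]
      exact ih _ (fun x hx => hb x (by simp [hx]))
  rw [h (List.range (word.length + 1)) ball
      (fun i hi => by have := List.mem_range.mp hi; omega)]

lemma pvB_row (word : List Int) (b : Int) (ball : List (List Int)) (iN : Nat) :
    pvBRow word (word.length : Int) b ball (iN : Int) = pvRowSpec word b ball iN := by
  simp only [pvBRow]
  rw [PySem.List.slice_to_natCast, PySem.List.slice_from_natCast]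
  have hw : word.take iN ++ b :: word.drop iN = pvW word b iN := rfl
  rw [hw, PySem.List.slice_from_one]
  have htail : (pvW word b iN).tail = (pvW word b iN).eraseIdx 0 := by
    rw [List.eraseIdx_zero]
  rw [htail]
  have hc : ((word.length : Int) + 1) = ((word.length + 1 : Nat) : Int) := by push_cast; ring
  rw [hc]
  have hrange : PySem.List.pyRange 1 ((word.length + 1 : Nat) : Int) =
      (List.range' 1 word.length).map (fun (j : Nat) => (j : Int)) := by
    have h0 : PySem.List.pyRange 0 ((word.length + 1 : Nat) : Int) =
        (0 : Int) :: PySem.List.pyRange 1 ((word.length + 1 : Nat) : Int) := by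
      exact PySem.List.pyRange_one_cons (by push_cast; omega)
    rw [PySem.List.pyRange_zero_natCast] at h0
    rw [List.range_eq_range', List.range'_succ] at h0
    simpa using h0.symm
  rw [hrange]
  have hinner := pvB_inner (pvW word b iN) (iN : Int) word.length 1
      (if (iN : Int) ≠ 0 then PySem.Set.add ball ((pvW word b iN).eraseIdx 0) else ball)
      (by omega) (by rw [pvW_length word b iN]; omega)
  simp only [Nat.sub_self] at hinner
  have he : 1 + word.length - 1 = word.length := by omega
  rw [he] at hinner
  rw [hinner]
  rw [pvRowSpec, pvSeq]
  rw [List.range_eq_range', List.range'_succ]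
  rw [show (0 : Nat) + 1 = 1 from rfl]
  rw [List.filter_cons]
  have hfilter : (List.range' 1 word.length).filter (fun (j : Nat) => ((j : Int) ≠ (iN : Int))) =
      (List.range' 1 word.length).filter (fun (j : Nat) => j ≠ iN) := by
    apply List.filter_congr
    intro j _
    simp
  by_cases h0 : iN = 0
  · have hd : (decide ¬ (0 : Nat) = iN) = false := by simp [h0]
    rw [hd, if_neg (show ¬ ((iN : Int) ≠ 0) by simp [h0]),
        if_neg (show ¬ (false = true) by simp), hfilter]
  · have hd : (decide ¬ (0 : Nat) = iN) = true := by simp [Ne.symm h0]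
    rw [hd, if_pos (show ((iN : Int) ≠ 0) by exact_mod_cast h0),
        if_pos (show (true = true) from rfl), List.map_cons, pvSet_update_cons, hfilter]

lemma pvBBlock_eq (word : List Int) (b : Int) (ball : List (List Int)) :
    (PySem.List.pyRange 0 ((word.length : Int) + 1)).foldl (pvBRow word (word.length : Int) b) ball =
      (List.range (word.length + 1)).foldl (pvRowSpec word b) ball := by
  have hc : ((word.length : Int) + 1) = ((word.length + 1 : Nat) : Int) := by push_cast; ring
  rw [hc, PySem.List.pyRange_zero_natCast, List.foldl_map]
  apply PySem.List.foldl_congr_mem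
  intro s i hi
  exact pvB_row word b s i

-- ===== VERDICT (by name: the statement is the Claim_ definition above) =====
theorem get_radius1_l_ball_spec : Claim_equal_get_radius1_l_ball := by
  intro word _
  unfold Spec_get_radius1_l_ball
  unfold get_radius1_l_ball get_radius1_l_ball_alt
  simp only [List.foldl_cons, List.foldl_nil]
  rw [pvBBlock_eq, pvBBlock_eq, pvABlock_eq, pvABlock_eq]
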